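-- pv_equiv track=rewrite | github.com/depth221/Automated_for_OSM_python | nameko_from_name(ncat).py | remove_bracket
-- ===== SOURCE A (Python) =====
-- def remove_bracket(str):
-- 	_str = ""
-- 	_name_en = ""
-- 	count = 0
-- 	str_list = list(str)
--
-- 	for char in str_list:
-- 		count += 1
-- 		if char == "(":
-- 			count -= 1
-- 			break
--
-- 	for char in str_list:
-- 		count -= 1
-- 		if count >= 0:
-- 			_str = _str + char
--
-- 		if count <= -2:
-- 			_name_en = _name_en + char
--
-- 	_name_en_list = list(_name_en)
-- 	_name_en_list.pop(-1)
-- 	_name_en = "".join(_name_en_list)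
--
-- 	_str = _str.strip()
-- 	return [_str, _name_en]
-- ===== SOURCE B (Python) =====
-- def remove_bracket(str):
--     i = str.index("(")
--     return [str[:i].strip(), str[i + 1:len(str) - 1]]
-- ===== Notes on version B (the rewrite author's own statement) =====
-- stated objective: simpler
-- what changed: Replaces A's two counting loops (an index-counting scan plus a second scan that rebuilds both pieces character by character) with one index lookup and two slices: i = str.index('('), name = str[:i].strip(), english = str[i+1:len(str)-1].
-- outside the precondition, e.g. on remove_bracket('('): A raises IndexError, B returns ['', '']
import Mathlib
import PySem

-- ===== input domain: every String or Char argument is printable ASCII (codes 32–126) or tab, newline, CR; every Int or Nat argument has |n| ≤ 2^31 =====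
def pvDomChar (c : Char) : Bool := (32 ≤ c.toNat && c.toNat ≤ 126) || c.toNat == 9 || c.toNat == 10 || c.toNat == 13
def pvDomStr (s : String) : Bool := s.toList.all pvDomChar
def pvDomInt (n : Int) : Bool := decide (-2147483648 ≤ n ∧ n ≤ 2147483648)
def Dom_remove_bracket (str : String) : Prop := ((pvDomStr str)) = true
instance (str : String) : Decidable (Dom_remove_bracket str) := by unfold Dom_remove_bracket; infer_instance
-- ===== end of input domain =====

-- B replaces A's two counting loops by one index('(') lookup and two slices (objective: simpler).

-- ===== PORT A =====
-- first loop: count += 1; on '(' count -= 1 and break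
def rbFirstLoop : List Char → Int → Int
  | [], count => count
  | ch :: rest, count =>
      if ch = '(' then (count + 1) - 1 else rbFirstLoop rest (count + 1)

-- second loop: count -= 1; append to _str while count >= 0, to _name_en while count <= -2
def rbStep (st : Int × List Char × List Char) (ch : Char) : Int × List Char × List Char :=
  let count := st.1 - 1
  (count,
   (if count ≥ 0 then st.2.1 ++ [ch] else st.2.1),
   (if count ≤ -2 then st.2.2 ++ [ch] else st.2.2))

def remove_bracket (str : String) : List String :=
  match PySem.List.pop? ((str.toList.foldl rbStep (rbFirstLoop str.toList 0, [], [])).2.2) (-1) with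
  | none => []   -- _name_en_list.pop(-1) raised IndexError
  | some (_, name_en) =>
      [String.ofList (PySem.Chars.strip ((str.toList.foldl rbStep (rbFirstLoop str.toList 0, [], [])).2.1)),
       String.ofList name_en]

-- ===== PORT B =====
def remove_bracket_alt (str : String) : List String :=
  if PySem.Str.find str "(" = -1 then []   -- str.index("(") raised ValueError
  else
    [String.ofList (PySem.Chars.strip (PySem.List.slice str.toList none (some (PySem.Str.find str "(")))),
     String.ofList (PySem.List.slice str.toList (some (PySem.Str.find str "(" + 1))
       (some (PySem.Str.len str - 1)))]

-- ===== PRECONDITION & SPEC =====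
-- Pre_ excludes exactly the inputs on which A raises IndexError at pop(-1): strings with no
-- '(' at all, or whose first '(' is the last character (nothing follows it).
def Pre_remove_bracket (str : String) : Prop :=
  2 ≤ (str.toList.dropWhile (· ≠ '(')).length
instance (str : String) : Decidable (Pre_remove_bracket str) := by
  unfold Pre_remove_bracket; infer_instance

def pvWitness_remove_bracket : String := "a(b)"

def Spec_remove_bracket (str : String) (out : List String) : Prop := out = remove_bracket_alt str
instance (str : String) (out : List String) : Decidable (Spec_remove_bracket str out) := by unfold Spec_remove_bracket; infer_instance

-- ===== CLAIM (what is proved, stated in full; the proofs are below) =====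
def Claim_equal_remove_bracket : Prop := ∀ (str : String), Dom_remove_bracket str → Pre_remove_bracket str → Spec_remove_bracket str (remove_bracket str)

-- ===== LEMMAS AND PROOFS =====

-- A's first loop computes (start + index of first '(').
theorem rbFirstLoop_eq (pre post : List Char) (h : '(' ∉ pre) (c : Int) :
    rbFirstLoop (pre ++ '(' :: post) c = c + pre.length := by
  induction pre generalizing c with
  | nil => simp [rbFirstLoop]
  | cons x xs ih =>
      have hx : x ≠ '(' := by intro hx; exact h (by simp [hx])
      have hxs : '(' ∉ xs := fun hm => h (List.mem_cons_of_mem _ hm)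
      simp only [List.cons_append, rbFirstLoop, if_neg hx, ih hxs]
      push_cast [List.length_cons]; ring

-- phase 1 of A's second loop: while count stays ≥ 0 everything goes to _str
theorem rbFold_phase1 (l : List Char) (s en : List Char) :
    l.foldl rbStep ((l.length : Int), s, en) = (0, s ++ l, en) := by
  induction l generalizing s with
  | nil => simp
  | cons x xs ih =>
      have h1 : ((x :: xs).length : Int) - 1 = (xs.length : Int) := by push_cast [List.length_cons]; ring
      simp only [List.foldl_cons, rbStep, h1]
      rw [if_pos (by positivity), if_neg (by omega)]
      simpa using ih (s ++ [x])

-- phase 2: once count < 0 everything (from count ≤ -2 on) goes to _name_en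
theorem rbFold_phase2 (l : List Char) (c : Int) (hc : c ≤ -1) (s en : List Char) :
    l.foldl rbStep (c, s, en) = (c - l.length, s, en ++ l) := by
  induction l generalizing c en with
  | nil => simp
  | cons x xs ih =>
      simp only [List.foldl_cons, rbStep]
      rw [if_neg (by omega), if_pos (by omega)]
      rw [ih (c - 1) (by omega) (en ++ [x])]
      simp only [Prod.mk.injEq, List.append_assoc, List.cons_append, List.nil_append,
        List.length_cons, and_true]
      push_cast; ring

theorem rbFold_split (pre post : List Char) :
    (pre ++ '(' :: post).foldl rbStep ((pre.length : Int), [], []) =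
      (-1 - (post.length : Int), pre, post) := by
  rw [List.foldl_append, rbFold_phase1]
  simp only [List.foldl_cons, rbStep]
  rw [if_neg (by omega), if_neg (by omega)]
  simpa using rbFold_phase2 post (-1) (by omega) pre []

-- B's find locates the first '('.
theorem find_split (pre post : List Char) (h : '(' ∉ pre) :
    PySem.Chars.find (pre ++ '(' :: post) ['('] = (pre.length : Int) := by
  set cs := pre ++ '(' :: post with hcs
  have hinf : ['('] <:+: cs := ⟨pre, post, by simp [hcs]⟩
  have hne : PySem.Chars.find cs ['('] ≠ -1 := by
    rw [Ne, PySem.Chars.find_eq_neg_one_iff]; exact not_not_intro hinf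
  have hspec := PySem.Chars.findFrom_natCast_spec cs ['('] 0 (Nat.zero_le _)
  simp only [Nat.cast_zero, PySem.Chars.findFrom_zero] at hspec
  obtain ⟨-, hpref, hmin⟩ := hspec hne
  set f := PySem.Chars.find cs ['('] with hf
  have hfle : f.toNat ≤ pre.length := by
    by_contra hlt
    exact hmin pre.length (Nat.zero_le _) (by omega) (by simp [hcs])
  have hnonneg : 0 ≤ f := by
    rcases (PySem.Chars.find_nonneg_iff cs ['(']).2 hinf with h0; exact h0
  rcases Nat.lt_or_ge f.toNat pre.length with hlt | hge
  · exfalso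
    have : cs.drop f.toNat = pre.drop f.toNat ++ '(' :: post := by
      rw [hcs, List.drop_append_of_le_length (by omega)]
    rw [this] at hpref
    have hd : (pre.drop f.toNat ++ '(' :: post).head? = some '(' := by
      rcases hpref with ⟨t, ht⟩
      rw [← ht]; rfl
    have hplen : 0 < (pre.drop f.toNat).length := by simpa using hlt
    obtain ⟨y, ys, hy⟩ := List.exists_cons_of_ne_nil (List.ne_nil_of_length_pos hplen)
    have hymem : y ∈ pre := by
      have := List.mem_of_mem_drop (l := pre) (i := f.toNat) (by rw [hy]; exact List.mem_cons_self)
      exact this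
    rw [hy] at hd
    simp only [List.cons_append, List.head?_cons, Option.some.injEq] at hd
    exact h (hd ▸ hymem)
  · omega

-- characterize inputs in Pre_: str.toList = pre ++ '(' :: post with '(' ∉ pre, post ≠ []
theorem decomp_aux (cs : List Char) (hp : 2 ≤ (cs.dropWhile (· ≠ '(')).length) :
    ∃ pre post, cs = pre ++ '(' :: post ∧ '(' ∉ pre ∧ post ≠ [] := by
  induction cs with
  | nil => simp at hp
  | cons x rest ih =>
      by_cases hx : x = '('
      · subst hx
        rw [List.dropWhile_cons_of_neg (by simp)] at hp
        refine ⟨[], rest, by simp, by simp, ?_⟩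
        intro h0; rw [h0] at hp; simp at hp
      · rw [List.dropWhile_cons_of_pos (by simp [hx])] at hp
        obtain ⟨pre, post, h1, h2, h3⟩ := ih hp
        exact ⟨x :: pre, post, by simp [h1], by simp [h2, Ne.symm hx], h3⟩

theorem pre_decomp (str : String) (hp : Pre_remove_bracket str) :
    ∃ pre post, str.toList = pre ++ '(' :: post ∧ '(' ∉ pre ∧ post ≠ [] :=
  decomp_aux str.toList hp

theorem remove_bracket_eq (str : String) (hp : Pre_remove_bracket str) :
    remove_bracket str = remove_bracket_alt str := by
  obtain ⟨pre, post, hcs, hnotin, hpost⟩ := pre_decomp str hp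
  obtain ⟨z, zs, hz⟩ := List.exists_cons_of_ne_nil hpost
  -- A's side
  have hA : remove_bracket str =
      [String.ofList (PySem.Chars.strip pre), String.ofList post.dropLast] := by
    unfold remove_bracket
    rw [hcs, rbFirstLoop_eq pre post hnotin 0, zero_add, rbFold_split]
    have hp2 : post = post.dropLast ++ [post.getLast hpost] :=
      (List.dropLast_append_getLast hpost).symm
    conv_lhs => rw [hp2]
    rw [PySem.List.pop?_last]
  -- B's side
  have hfind : PySem.Str.find str "(" = (pre.length : Int) := by
    rw [PySem.Str.find_eq, hcs]
    exact find_split pre post hnotin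
  have hB : remove_bracket_alt str =
      [String.ofList (PySem.Chars.strip pre), String.ofList post.dropLast] := by
    unfold remove_bracket_alt
    rw [hfind, if_neg (by omega)]
    have hs1 : PySem.List.slice str.toList none (some (pre.length : Int)) = pre := by
      rw [PySem.List.slice_to _ (by positivity)]
      rw [hcs, Int.toNat_natCast, List.take_left]
    have hlen : PySem.Str.len str - 1 = ((pre.length + 1 + post.dropLast.length : Nat) : Int) := by
      rw [PySem.Str.len_eq, hcs]
      have : post.length = post.dropLast.length + 1 := by
        rw [hz]; simp
      simp only [List.length_append, List.length_cons, this]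
      push_cast; ring
    have hs2 : PySem.List.slice str.toList (some ((pre.length : Int) + 1))
        (some (PySem.Str.len str - 1)) = post.dropLast := by
      rw [hlen, show ((pre.length : Int) + 1) = ((pre.length + 1 : Nat) : Int) by push_cast; ring,
          PySem.List.slice_natCast]
      rw [hcs, Nat.add_sub_cancel_left]
      rw [show pre ++ '(' :: post = (pre ++ ['(']) ++ post by simp]
      rw [List.drop_left' (by simp), List.length_dropLast, ← List.dropLast_eq_take]
    rw [hs1, hs2]
  rw [hA, hB]

-- ===== VERDICT (by name: the statement is the Claim_ definition above) =====
theorem remove_bracket_spec : Claim_equal_remove_bracket := by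
  intro str _ hp
  unfold Spec_remove_bracket
  exact remove_bracket_eq str hp
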